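-- pv_equiv track=rewrite | github.com/nii-yamagishilab/predominant-instrument-recognition | src/datasets/sf.py | get_bgm_metadata
-- ===== SOURCE A (Python) =====
-- def get_bgm_metadata(metadata):
--     from collections import defaultdict
--     bgm_meta = defaultdict(dict)
--     for label_idx in range(11):
--         for k, v in metadata.items():
--             if v['instrument'] != label_idx:
--                 bgm_meta[label_idx].update({k: metadata[k]})
--
--     return bgm_meta
-- ===== SOURCE B (Python) =====
-- def get_bgm_metadata(metadata):
--     from collections import defaultdict
--     # Group once: record, per instrument, the keys that belong to it.
--     own = defaultdict(list)
--     for k, v in metadata.items():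
--         own[v['instrument']].append(k)
--     # Per label: copy the full dict and DELETE that label's own keys
--     # (set difference instead of A's per-label filter scan).
--     bgm_meta = defaultdict(dict)
--     for label in range(11):
--         d = dict(metadata)
--         for k in own.get(label, ()):
--             del d[k]
--         if d:
--             bgm_meta[label] = d
--     return bgm_meta
-- ===== Notes on version B (the rewrite author's own statement) =====
-- stated objective: alternative
-- what changed: A fills each of the 11 label dicts by scanning all of metadata and testing v['instrument'] != label per entry; B never performs that test during assembly: it groups the keys by instrument in one pass, then builds each label's dict by copying the full dict and DELETING that label's own keys (set difference instead of per-label filtering).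
import Mathlib
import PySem

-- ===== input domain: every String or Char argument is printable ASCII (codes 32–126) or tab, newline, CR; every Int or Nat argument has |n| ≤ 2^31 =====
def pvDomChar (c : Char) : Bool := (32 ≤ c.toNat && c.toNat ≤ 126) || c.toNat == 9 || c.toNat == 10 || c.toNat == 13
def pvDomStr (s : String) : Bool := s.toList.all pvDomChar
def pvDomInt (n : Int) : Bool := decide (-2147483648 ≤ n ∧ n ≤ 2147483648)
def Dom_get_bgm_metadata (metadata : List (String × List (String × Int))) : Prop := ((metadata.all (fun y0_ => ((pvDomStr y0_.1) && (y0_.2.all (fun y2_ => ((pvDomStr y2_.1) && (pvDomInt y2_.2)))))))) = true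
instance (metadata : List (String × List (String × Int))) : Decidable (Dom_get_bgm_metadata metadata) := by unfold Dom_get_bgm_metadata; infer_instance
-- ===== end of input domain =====

-- B replaces A's per-label filter scans (testing v['instrument'] != label on every entry,
-- 11 times) by one grouping pass recording each instrument's own keys, then builds each
-- label's dict by copying the full dict and deleting that label's keys (objective: alternative).

-- ===== PORT A =====
-- inner 'for k, v in metadata.items(): …' loop of A, for one label_idx
def pvAinner (metadata : List (String × List (String × Int)))
    (bgm : PySem.Dict Int (List (String × List (String × Int)))) (label_idx : Int) :
    PySem.Dict Int (List (String × List (String × Int))) :=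
  metadata.foldl (fun bgm kv =>
    match (PySem.Dict.mk kv.2).get? "instrument" with
    | some instr =>
        if instr ≠ label_idx then
          -- bgm_meta[label_idx].update({k: metadata[k]})  (defaultdict: absent key starts empty)
          bgm.insert label_idx
            ((PySem.Dict.mk (bgm.getD label_idx [])).insert kv.1
              ((PySem.Dict.mk metadata).getD kv.1 [])).items
        else bgm
    | none => bgm) bgm  -- none = KeyError 'instrument' in Python; excluded by Pre_

def get_bgm_metadata (metadata : List (String × List (String × Int))) : List (Int × List (String × List (String × Int))) :=
  ((PySem.List.pyRange 0 11 1).foldl (pvAinner metadata) (PySem.Dict.mk [])).items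

-- ===== PORT B =====
-- grouping pass of B: own[v['instrument']].append(k)   (defaultdict(list) = modify with default [])
def pvOwn (metadata : List (String × List (String × Int))) : PySem.Dict Int (List String) :=
  metadata.foldl (fun d kv =>
    match (PySem.Dict.mk kv.2).get? "instrument" with
    | some i => d.modify i [] (· ++ [kv.1])
    | none => d) (PySem.Dict.mk [])  -- none = KeyError 'instrument' in Python; excluded by Pre_

-- per-label body of B: d = dict(metadata); for k in own.get(label, ()): del d[k]
def pvBlabel (metadata : List (String × List (String × Int)))
    (own : PySem.Dict Int (List String)) (label : Int) : List (String × List (String × Int)) :=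
  ((own.getD label []).foldl (fun d k => d.erase k) (PySem.Dict.mk metadata)).items

def get_bgm_metadata_alt (metadata : List (String × List (String × Int))) : List (Int × List (String × List (String × Int))) :=
  let own := pvOwn metadata
  ((PySem.List.pyRange 0 11 1).foldl (fun out label =>
      let d := pvBlabel metadata own label
      if d ≠ [] then out.insert label d else out)
    (PySem.Dict.mk [])).items

-- ===== PRECONDITION & SPEC =====
-- Pre_ excludes entries whose inner dict has no 'instrument' key (Python A raises KeyError
-- there) and association lists with duplicate outer keys (a Python dict argument cannot
-- carry duplicate keys, so such lists represent no input A ever receives).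
def Pre_get_bgm_metadata (metadata : List (String × List (String × Int))) : Prop :=
  (metadata.map Prod.fst).Nodup ∧
  ∀ kv ∈ metadata, (PySem.Dict.mk kv.2).contains "instrument" = true
instance (metadata : List (String × List (String × Int))) : Decidable (Pre_get_bgm_metadata metadata) := by unfold Pre_get_bgm_metadata; infer_instance

def pvWitness_get_bgm_metadata : (List (String × List (String × Int))) :=
  [("a", [("instrument", 3)]), ("b", [("instrument", 0), ("x", 1)])]

def Spec_get_bgm_metadata (metadata : List (String × List (String × Int))) (out : List (Int × List (String × List (String × Int)))) : Prop := out = get_bgm_metadata_alt metadata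
instance (metadata : List (String × List (String × Int))) (out : List (Int × List (String × List (String × Int)))) : Decidable (Spec_get_bgm_metadata metadata out) := by unfold Spec_get_bgm_metadata; infer_instance

-- ===== CLAIM (what is proved, stated in full; the proofs are below) =====
def Claim_equal_get_bgm_metadata : Prop := ∀ (metadata : List (String × List (String × Int))), Dom_get_bgm_metadata metadata → Pre_get_bgm_metadata metadata → Spec_get_bgm_metadata metadata (get_bgm_metadata metadata)

-- ===== LEMMAS AND PROOFS =====

-- the entry filter A implements for one label
def pvPred (l : Int) (kv : String × List (String × Int)) : Bool :=
  match (PySem.Dict.mk kv.2).get? "instrument" with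
  | some i => decide (i ≠ l)
  | none => false

def pvFlt (metadata : List (String × List (String × Int))) (l : Int) : List (String × List (String × Int)) :=
  metadata.filter (pvPred l)

-- the common normal form of both outputs
def pvOut (metadata : List (String × List (String × Int))) (ls : List Int) : List (Int × List (String × List (String × Int))) :=
  ls.flatMap (fun l => if pvFlt metadata l = [] then [] else [(l, pvFlt metadata l)])

-- A's inner-loop body after replacing metadata[k] by the entry's own value v
def pvStep (l : Int) (bgm : PySem.Dict Int (List (String × List (String × Int))))
    (kv : String × List (String × Int)) : PySem.Dict Int (List (String × List (String × Int))) :=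
  match (PySem.Dict.mk kv.2).get? "instrument" with
  | some instr =>
      if instr ≠ l then
        bgm.insert l ((PySem.Dict.mk (bgm.getD l [])).insert kv.1 kv.2).items
      else bgm
  | none => bgm

lemma pv_pred_some {l : Int} {kv : String × List (String × Int)} {i : Int}
    (hi : (PySem.Dict.mk kv.2).get? "instrument" = some i) : pvPred l kv = decide (i ≠ l) := by
  unfold pvPred; rw [hi]

lemma pv_pred_none {l : Int} {kv : String × List (String × Int)}
    (hi : (PySem.Dict.mk kv.2).get? "instrument" = none) : pvPred l kv = false := by
  unfold pvPred; rw [hi]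

lemma pv_step_true {l : Int} {kv : String × List (String × Int)}
    (bgm : PySem.Dict Int (List (String × List (String × Int)))) (hp : pvPred l kv = true) :
    pvStep l bgm kv = bgm.insert l ((PySem.Dict.mk (bgm.getD l [])).insert kv.1 kv.2).items := by
  unfold pvStep
  cases hi : (PySem.Dict.mk kv.2).get? "instrument" with
  | none => rw [pv_pred_none hi] at hp; cases hp
  | some i =>
      have hne : i ≠ l := by rw [pv_pred_some hi] at hp; exact of_decide_eq_true hp
      show (if i ≠ l then bgm.insert l ((PySem.Dict.mk (bgm.getD l [])).insert kv.1 kv.2).items else bgm) = _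
      rw [if_pos hne]

lemma pv_step_false {l : Int} {kv : String × List (String × Int)}
    (bgm : PySem.Dict Int (List (String × List (String × Int)))) (hp : pvPred l kv = false) :
    pvStep l bgm kv = bgm := by
  unfold pvStep
  cases hi : (PySem.Dict.mk kv.2).get? "instrument" with
  | none => rfl
  | some i =>
      have heq : ¬ (i ≠ l) := by
        rw [pv_pred_some hi] at hp
        simpa using of_decide_eq_false hp
      show (if i ≠ l then bgm.insert l ((PySem.Dict.mk (bgm.getD l [])).insert kv.1 kv.2).items else bgm) = _
      rw [if_neg heq]

lemma pv_mk_insert_append {κ ν : Type} [BEq κ] [LawfulBEq κ] (cur : List (κ × ν)) (k : κ) (v : ν)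
    (h : k ∉ cur.map Prod.fst) :
    (PySem.Dict.mk cur).insert k v = PySem.Dict.mk (cur ++ [(k, v)]) := by
  have hc : (PySem.Dict.mk cur).contains k = false := by
    rw [← Bool.not_eq_true, PySem.Dict.contains_iff_mem_keys]
    simpa [PySem.Dict.keys] using h
  exact PySem.Dict.ext (PySem.Dict.items_insert_of_not_contains _ v hc)

lemma pv_mk_get?_last {κ ν : Type} [BEq κ] [LawfulBEq κ] (pre : List (κ × ν)) (l : κ) (cur : ν)
    (h : l ∉ pre.map Prod.fst) :
    (PySem.Dict.mk (pre ++ [(l, cur)])).get? l = some cur := by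
  induction pre with
  | nil => simp [PySem.Dict.get?_mk_cons]
  | cons p pre ih =>
      rw [List.cons_append, PySem.Dict.get?_mk_cons]
      simp only [List.map_cons, List.mem_cons] at h
      push Not at h
      rw [if_neg (by simpa using (Ne.symm h.1))]
      exact ih h.2

lemma pv_mk_insert_last {κ ν : Type} [BEq κ] [LawfulBEq κ] (pre : List (κ × ν)) (l : κ) (cur v : ν)
    (h : l ∉ pre.map Prod.fst) :
    (PySem.Dict.mk (pre ++ [(l, cur)])).insert l v = PySem.Dict.mk (pre ++ [(l, v)]) := by
  have hc : (PySem.Dict.mk (pre ++ [(l, cur)])).contains l = true := by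
    rw [PySem.Dict.contains_iff_mem_keys]
    show l ∈ (pre ++ [(l, cur)]).map Prod.fst
    simp
  apply PySem.Dict.ext
  rw [PySem.Dict.items_insert_of_contains _ v hc]
  show (pre ++ [(l, cur)]).map _ = _
  rw [List.map_append]
  congr 1
  · have : ∀ p ∈ pre, (fun p => if (p.1 == l) = true then (l, v) else p) p = id p := by
      intro p hp
      have hne : p.1 ≠ l := fun he => h (he ▸ List.mem_map_of_mem hp)
      simp [hne]
    rw [List.map_congr_left this, List.map_id]
  · simp

lemma pv_A_run (l : Int) (rest : List (String × List (String × Int))) :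
    ∀ (pre : List (Int × List (String × List (String × Int)))) (cur : List (String × List (String × Int))),
    l ∉ pre.map Prod.fst →
    (∀ kv ∈ rest, kv.1 ∉ cur.map Prod.fst) →
    (rest.map Prod.fst).Nodup →
    rest.foldl (pvStep l) (PySem.Dict.mk (pre ++ [(l, cur)]))
      = PySem.Dict.mk (pre ++ [(l, cur ++ rest.filter (pvPred l))]) := by
  induction rest with
  | nil => intro pre cur _ _ _; simp
  | cons kv rest ih =>
      intro pre cur hpre hfresh hnd
      rw [List.foldl_cons]
      have hnd2 : kv.1 ∉ rest.map Prod.fst ∧ (rest.map Prod.fst).Nodup := by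
        simpa using hnd
      by_cases hp : pvPred l kv = true
      · have hfr : kv.1 ∉ cur.map Prod.fst := hfresh kv (by simp)
        rw [pv_step_true _ hp, PySem.Dict.getD_eq_get?_getD, pv_mk_get?_last pre l cur hpre]
        show rest.foldl (pvStep l)
            ((PySem.Dict.mk (pre ++ [(l, cur)])).insert l ((PySem.Dict.mk cur).insert kv.1 kv.2).items) = _
        rw [pv_mk_insert_append cur kv.1 kv.2 hfr]
        show rest.foldl (pvStep l)
            ((PySem.Dict.mk (pre ++ [(l, cur)])).insert l (cur ++ [(kv.1, kv.2)])) = _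
        rw [pv_mk_insert_last pre l cur _ hpre]
        rw [ih pre (cur ++ [(kv.1, kv.2)]) hpre ?_ hnd2.2]
        · rw [List.filter_cons_of_pos hp]
          simp
        · intro kv' hkv'
          have h1 : kv'.1 ∉ cur.map Prod.fst := hfresh kv' (List.mem_cons_of_mem _ hkv')
          have h2 : kv'.1 ≠ kv.1 := fun he =>
            hnd2.1 (he ▸ List.mem_map_of_mem (f := Prod.fst) hkv')
          simpa using And.intro h1 h2
      · rw [pv_step_false _ (by simpa using hp)]
        rw [ih pre cur hpre (fun kv' h => hfresh kv' (List.mem_cons_of_mem _ h)) hnd2.2]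
        rw [List.filter_cons_of_neg (by simpa using hp)]

lemma pv_A_start (l : Int) (rest : List (String × List (String × Int))) :
    ∀ (bgm : PySem.Dict Int (List (String × List (String × Int)))),
    bgm.get? l = none →
    (rest.map Prod.fst).Nodup →
    (rest.foldl (pvStep l) bgm).items
      = bgm.items ++ (if rest.filter (pvPred l) = [] then [] else [(l, rest.filter (pvPred l))]) := by
  induction rest with
  | nil => intro bgm _ _; simp
  | cons kv rest ih =>
      intro bgm hnone hnd
      rw [List.foldl_cons]
      have hnd2 : kv.1 ∉ rest.map Prod.fst ∧ (rest.map Prod.fst).Nodup := by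
        simpa using hnd
      have hlmem : l ∉ bgm.items.map Prod.fst := by
        have := (PySem.Dict.get?_eq_none_iff_not_mem_keys bgm l).mp hnone
        simpa [PySem.Dict.keys] using this
      by_cases hp : pvPred l kv = true
      · have hstep : pvStep l bgm kv = PySem.Dict.mk (bgm.items ++ [(l, [(kv.1, kv.2)])]) := by
          rw [pv_step_true _ hp, PySem.Dict.getD_eq_get?_getD, hnone]
          show bgm.insert l ((PySem.Dict.mk []).insert kv.1 kv.2).items = _
          rw [pv_mk_insert_append [] kv.1 kv.2 (by simp)]
          have hc : bgm.contains l = false := by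
            rw [← Bool.not_eq_true, PySem.Dict.contains_iff_mem_keys]
            simpa [PySem.Dict.keys] using hlmem
          exact PySem.Dict.ext (PySem.Dict.items_insert_of_not_contains _ _ hc)
        have hfresh : ∀ kv' ∈ rest, kv'.1 ∉ ([(kv.1, kv.2)] : List (String × List (String × Int))).map Prod.fst := by
          intro kv' hkv'
          have h2 : kv'.1 ≠ kv.1 := fun he =>
            hnd2.1 (he ▸ List.mem_map_of_mem (f := Prod.fst) hkv')
          simpa using h2
        rw [hstep, pv_A_run l rest bgm.items [(kv.1, kv.2)] hlmem hfresh hnd2.2]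
        rw [List.filter_cons_of_pos hp]
        simp
      · rw [pv_step_false _ (by simpa using hp), ih bgm hnone hnd2.2,
          List.filter_cons_of_neg (by simpa using hp)]

lemma pv_A_outer (metadata : List (String × List (String × Int)))
    (hnd : (metadata.map Prod.fst).Nodup) (ls : List Int) :
    ∀ (bgm : PySem.Dict Int (List (String × List (String × Int)))),
    ls.Nodup → (∀ l ∈ ls, bgm.get? l = none) →
    (ls.foldl (fun b l => metadata.foldl (pvStep l) b) bgm).items
      = bgm.items ++ pvOut metadata ls := by
  induction ls with
  | nil => intro bgm _ _; simp [pvOut]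
  | cons l ls ih =>
      intro bgm hndl hnone
      have hndl2 := List.nodup_cons.mp hndl
      rw [List.foldl_cons]
      have h1 := pv_A_start l metadata bgm (hnone l (by simp)) hnd
      have hnone' : ∀ l' ∈ ls, (metadata.foldl (pvStep l) bgm).get? l' = none := by
        intro l' hl'
        rw [PySem.Dict.get?_eq_none_iff_not_mem_keys]
        show l' ∉ PySem.Dict.keys _
        have hk : PySem.Dict.keys (metadata.foldl (pvStep l) bgm)
            = (metadata.foldl (pvStep l) bgm).items.map Prod.fst := rfl
        rw [hk, h1, List.map_append]
        intro hmem
        rcases List.mem_append.mp hmem with h | h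
        · have := (PySem.Dict.get?_eq_none_iff_not_mem_keys bgm l').mp
            (hnone l' (List.mem_cons_of_mem _ hl'))
          exact this (by simpa [PySem.Dict.keys] using h)
        · have hne : l' ≠ l := fun he => hndl2.1 (he ▸ hl')
          split at h <;> simp_all
      rw [ih (metadata.foldl (pvStep l) bgm) hndl2.2 hnone', h1]
      show _ = bgm.items ++ pvOut metadata (l :: ls)
      unfold pvOut
      rw [List.flatMap_cons, List.append_assoc]
      rfl

-- A's body equals pvStep on the entries of metadata itself (metadata[k] = v under Nodup keys)
lemma pv_Ainner_eq (metadata : List (String × List (String × Int)))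
    (hnd : (metadata.map Prod.fst).Nodup)
    (bgm : PySem.Dict Int (List (String × List (String × Int)))) (l : Int) :
    pvAinner metadata bgm l = metadata.foldl (pvStep l) bgm := by
  unfold pvAinner
  apply PySem.List.foldl_congr_mem
  intro b kv hkv
  have hmem : (kv.1, kv.2) ∈ (PySem.Dict.mk metadata).items := by simpa using hkv
  have hv : (PySem.Dict.mk metadata).getD kv.1 [] = kv.2 :=
    PySem.Dict.getD_of_mem_items _ hmem (by simpa [PySem.Dict.keys] using hnd) []
  unfold pvStep
  rw [hv]

lemma pv_A_form (metadata : List (String × List (String × Int)))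
    (hnd : (metadata.map Prod.fst).Nodup) :
    get_bgm_metadata metadata = pvOut metadata (PySem.List.pyRange 0 11 1) := by
  unfold get_bgm_metadata
  have hfun : pvAinner metadata = fun b l => metadata.foldl (pvStep l) b :=
    funext fun b => funext fun l => pv_Ainner_eq metadata hnd b l
  rw [hfun]
  rw [pv_A_outer metadata hnd (PySem.List.pyRange 0 11 1) (PySem.Dict.mk [])
      (PySem.List.nodup_pyRange_one 0 11) (fun l _ => rfl)]
  rfl

-- ===== B-side lemmas =====

-- the keys metadata assigns to instrument l, in metadata order
def pvKeys (metadata : List (String × List (String × Int))) (l : Int) : List String :=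
  (metadata.filter (fun kv => (PySem.Dict.mk kv.2).get? "instrument" == some l)).map Prod.fst

lemma pv_own_run (rest : List (String × List (String × Int))) :
    ∀ (d : PySem.Dict Int (List String)),
    (∀ kv ∈ rest, (PySem.Dict.mk kv.2).contains "instrument" = true) →
    ∀ l, ((rest.foldl (fun d kv =>
        match (PySem.Dict.mk kv.2).get? "instrument" with
        | some i => d.modify i [] (· ++ [kv.1])
        | none => d) d).getD l [])
      = d.getD l [] ++ pvKeys rest l := by
  induction rest with
  | nil => intro d _ l; simp [pvKeys]
  | cons kv rest ih =>
      intro d hpre l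
      have hs : ((PySem.Dict.mk kv.2).get? "instrument").isSome := by
        have := hpre kv (by simp)
        rw [PySem.Dict.contains_eq_isSome_get?] at this
        exact this
      obtain ⟨i, hi⟩ := Option.isSome_iff_exists.mp hs
      rw [List.foldl_cons]
      have hstep : (match (PySem.Dict.mk kv.2).get? "instrument" with
          | some i => d.modify i [] (· ++ [kv.1])
          | none => d) = d.modify i [] (· ++ [kv.1]) := by rw [hi]
      rw [hstep, ih _ (fun kv' h => hpre kv' (List.mem_cons_of_mem _ h)) l]
      rw [PySem.Dict.getD_modify]
      by_cases hl : l = i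
      · subst hl
        rw [if_pos rfl]
        unfold pvKeys
        rw [List.filter_cons_of_pos (by simp [hi])]
        simp
      · rw [if_neg hl]
        unfold pvKeys
        rw [List.filter_cons_of_neg (by simp [hi, Ne.symm hl])]

lemma pv_own_getD (metadata : List (String × List (String × Int)))
    (hpre : ∀ kv ∈ metadata, (PySem.Dict.mk kv.2).contains "instrument" = true) (l : Int) :
    (pvOwn metadata).getD l [] = pvKeys metadata l := by
  unfold pvOwn
  rw [pv_own_run metadata (PySem.Dict.mk []) hpre l]
  rfl

lemma pv_erase_fold (S : List String) :
    ∀ (xs : List (String × List (String × Int))),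
    ((S.foldl (fun d k => d.erase k) (PySem.Dict.mk xs)).items)
      = xs.filter (fun p => !(S.contains p.1)) := by
  induction S with
  | nil => intro xs; simp
  | cons k S ih =>
      intro xs
      rw [List.foldl_cons]
      have hstep : (PySem.Dict.mk xs).erase k
          = PySem.Dict.mk (xs.filter (fun p => !(p.1 == k))) := rfl
      rw [hstep, ih (xs.filter (fun p => !(p.1 == k))), List.filter_filter]
      apply List.filter_congr
      intro p _
      by_cases h : p.1 = k <;> simp [h]

lemma pv_label_eq (metadata : List (String × List (String × Int)))
    (hnd : (metadata.map Prod.fst).Nodup)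
    (hpre : ∀ kv ∈ metadata, (PySem.Dict.mk kv.2).contains "instrument" = true) (l : Int) :
    pvBlabel metadata (pvOwn metadata) l = pvFlt metadata l := by
  unfold pvBlabel pvFlt
  rw [pv_own_getD metadata hpre l, pv_erase_fold]
  apply List.filter_congr
  intro kv hkv
  have hs : ((PySem.Dict.mk kv.2).get? "instrument").isSome := by
    have := hpre kv hkv
    rw [PySem.Dict.contains_eq_isSome_get?] at this
    exact this
  obtain ⟨i, hi⟩ := Option.isSome_iff_exists.mp hs
  rw [pv_pred_some hi]
  by_cases hil : i = l
  · subst hil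
    have hmem : kv.1 ∈ pvKeys metadata i := by
      unfold pvKeys
      exact List.mem_map_of_mem (List.mem_filter.mpr ⟨hkv, by simp [hi]⟩)
    simp [hmem]
  · have hnmem : kv.1 ∉ pvKeys metadata l := by
      intro hmem
      unfold pvKeys at hmem
      rcases List.mem_map.mp hmem with ⟨q, hq, hq1⟩
      have hqm : q ∈ metadata := List.mem_of_mem_filter hq
      have hqkv : q = kv := List.inj_on_of_nodup_map hnd hqm hkv hq1
      have : (PySem.Dict.mk kv.2).get? "instrument" == some l := by
        rw [← hqkv]
        exact (List.mem_filter.mp hq).2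
      rw [hi] at this
      exact hil (by simpa using this)
    simp [hnmem, hil]

lemma pv_B_asm (g : Int → List (String × List (String × Int))) (ls : List Int) :
    ∀ (out : PySem.Dict Int (List (String × List (String × Int)))),
    ls.Nodup → (∀ l ∈ ls, out.get? l = none) →
    (ls.foldl (fun out l => if g l ≠ [] then out.insert l (g l) else out) out).items
      = out.items ++ ls.flatMap (fun l => if g l = [] then [] else [(l, g l)]) := by
  induction ls with
  | nil => intro out _ _; simp
  | cons l ls ih =>
      intro out hnd hnone
      have hnd2 := List.nodup_cons.mp hnd
      rw [List.foldl_cons]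
      by_cases hfe : g l = []
      · rw [if_neg (by simp [hfe])]
        rw [ih out hnd2.2 (fun l' h => hnone l' (List.mem_cons_of_mem _ h))]
        rw [List.flatMap_cons, if_pos hfe, List.nil_append]
      · rw [if_pos hfe]
        have hc : out.contains l = false := by
          rw [← Bool.not_eq_true, PySem.Dict.contains_iff_mem_keys]
          exact (PySem.Dict.get?_eq_none_iff_not_mem_keys out l).mp (hnone l (by simp))
        have hnone' : ∀ l' ∈ ls, (out.insert l (g l)).get? l' = none := by
          intro l' hl'
          rw [PySem.Dict.get?_insert_of_ne _ _ (fun he => hnd2.1 (by rw [← he]; exact hl'))]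
          exact hnone l' (List.mem_cons_of_mem _ hl')
        rw [ih _ hnd2.2 hnone']
        rw [PySem.Dict.items_insert_of_not_contains _ _ hc]
        rw [List.flatMap_cons, if_neg hfe]
        simp [List.append_assoc]

lemma pv_B_form (metadata : List (String × List (String × Int)))
    (hnd : (metadata.map Prod.fst).Nodup)
    (hpre : ∀ kv ∈ metadata, (PySem.Dict.mk kv.2).contains "instrument" = true) :
    get_bgm_metadata_alt metadata = pvOut metadata (PySem.List.pyRange 0 11 1) := by
  show ((PySem.List.pyRange 0 11 1).foldl (fun out label =>
      let d := pvBlabel metadata (pvOwn metadata) label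
      if d ≠ [] then out.insert label d else out) (PySem.Dict.mk [])).items
    = pvOut metadata (PySem.List.pyRange 0 11 1)
  have hfun : (fun (out : PySem.Dict Int (List (String × List (String × Int)))) label =>
      let d := pvBlabel metadata (pvOwn metadata) label
      if d ≠ [] then out.insert label d else out)
      = fun out l => if pvFlt metadata l ≠ [] then out.insert l (pvFlt metadata l) else out := by
    funext out l
    show (if pvBlabel metadata (pvOwn metadata) l ≠ [] then out.insert l (pvBlabel metadata (pvOwn metadata) l) else out) = _
    rw [pv_label_eq metadata hnd hpre l]
  rw [hfun]
  rw [pv_B_asm (pvFlt metadata) (PySem.List.pyRange 0 11 1) (PySem.Dict.mk [])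
      (PySem.List.nodup_pyRange_one 0 11) (fun l _ => rfl)]
  rfl

-- ===== VERDICT (by name: the statement is the Claim_ definition above) =====
theorem get_bgm_metadata_spec : Claim_equal_get_bgm_metadata := by
  intro metadata _ hpre
  show get_bgm_metadata metadata = get_bgm_metadata_alt metadata
  rw [pv_A_form metadata hpre.1, pv_B_form metadata hpre.1 hpre.2]
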